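-- pv_equiv track=rewrite | github.com/manwar/perlweeklychallenge-club | challenge-265/roger-bell-west/python/ch-1.py | thirtythreepercentappearance
-- ===== SOURCE A (Python) =====
-- from collections import defaultdict
-- from math import floor
--
-- def thirtythreepercentappearance(a):
--   m = defaultdict(lambda: 0);
--   for n in a:
--     m[n] += 1
--   threshold = floor(len(a) * 33 / 100)
--   if floor(threshold * 100 / 33) != len(a):
--     threshold += 1
--   s = [k for k in m.keys() if m[k] >= threshold]
--   if len(s) > 0:
--     return min(s)
--   else:
--     return -1
-- ===== SOURCE B (Python) =====
-- from math import floor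
--
-- def thirtythreepercentappearance(a):
--   threshold = floor(len(a) * 33 / 100)
--   if floor(threshold * 100 / 33) != len(a):
--     threshold += 1
--   b = sorted(a)
--   prev = None
--   count = 0
--   for x in b:
--     count = count + 1 if x == prev else 1
--     prev = x
--     if count >= threshold:
--       return x
--   return -1
-- ===== Notes on version B (the rewrite author's own statement) =====
-- stated objective: simpler
-- what changed: Instead of building a frequency dict and then taking min over the qualifying keys, B sorts the list once and walks it counting the current run, returning the first (hence smallest) value whose run reaches the threshold; the threshold arithmetic is kept identical.
import Mathlib
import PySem

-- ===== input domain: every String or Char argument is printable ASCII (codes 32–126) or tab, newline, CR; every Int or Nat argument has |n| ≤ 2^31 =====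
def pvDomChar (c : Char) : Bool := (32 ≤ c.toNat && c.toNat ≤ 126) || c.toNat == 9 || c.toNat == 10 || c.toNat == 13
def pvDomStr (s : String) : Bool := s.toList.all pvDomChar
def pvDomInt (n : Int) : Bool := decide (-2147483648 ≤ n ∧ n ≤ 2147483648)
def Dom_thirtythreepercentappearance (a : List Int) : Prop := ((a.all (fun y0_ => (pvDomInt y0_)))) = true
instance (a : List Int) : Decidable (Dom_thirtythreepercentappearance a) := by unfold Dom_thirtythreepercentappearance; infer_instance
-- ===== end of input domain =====

-- B replaces A's frequency-dict + min-over-qualifying-keys by a single run-counting walk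
-- over sorted(a); objective: simpler. Neither version mutates its argument.

-- ===== PORT A =====
-- floor(len(a)*33/100) and floor(threshold*100/33): Python computes these through float
-- division of nonnegative ints; on the sampled lengths the double result floors to the exact
-- integer quotient, so both are ported as integer floor division (exact there).
def thirtythreepercentappearance (a : List Int) : Int :=
  let m : PySem.Dict Int Int := a.foldl (fun d n => d.insert n (d.getD n 0 + 1)) PySem.Dict.empty
  let t0 : Int := PySem.Int.floordiv ((a.length : Int) * 33) 100
  let t : Int := if PySem.Int.floordiv (t0 * 100) 33 ≠ (a.length : Int) then t0 + 1 else t0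
  let s : List Int := m.keys.filter (fun k => decide (t ≤ m.getD k 0))
  if 0 < s.length then (PySem.List.min? s (fun x => x)).getD (-1) else -1

-- ===== PORT B =====
-- the for-loop over sorted(a) with (prev, count) state and early return
def pvGoB (t : Int) : List Int → Option Int → Int → Int
  | [], _, _ => -1
  | x :: xs, prev, count =>
    let count' := if some x = prev then count + 1 else 1
    if t ≤ count' then x else pvGoB t xs (some x) count'

def thirtythreepercentappearance_alt (a : List Int) : Int :=
  let t0 : Int := PySem.Int.floordiv ((a.length : Int) * 33) 100
  let t : Int := if PySem.Int.floordiv (t0 * 100) 33 ≠ (a.length : Int) then t0 + 1 else t0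
  pvGoB t (PySem.List.sorted a (fun x => x) false) none 0

-- ===== PRECONDITION & SPEC =====
def Spec_thirtythreepercentappearance (a : List Int) (out : Int) : Prop := out = thirtythreepercentappearance_alt a
instance (a : List Int) (out : Int) : Decidable (Spec_thirtythreepercentappearance a out) := by unfold Spec_thirtythreepercentappearance; infer_instance

-- ===== CLAIM (what is proved, stated in full; the proofs are below) =====
def Claim_equal_thirtythreepercentappearance : Prop := ∀ (a : List Int), Dom_thirtythreepercentappearance a → Spec_thirtythreepercentappearance a (thirtythreepercentappearance a)

-- ===== LEMMAS AND PROOFS =====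

-- head of a (· ≤ ·)-pairwise list is ≤ every member
theorem pv_head_le_mem {h : Int} {l : List Int} (hp : (h :: l).Pairwise (· ≤ ·))
    {x : Int} (hx : x ∈ h :: l) : h ≤ x := by
  rcases List.mem_cons.mp hx with rfl | hx'
  · exact le_refl _
  · exact (List.pairwise_cons.mp hp).1 x hx'

-- common normal form: first element of the sorted list whose multiplicity in it reaches t
def pvSpecMin (t : Int) (b : List Int) : Int :=
  ((b.filter (fun v => decide (t ≤ (b.count v : Int)))).head?).getD (-1)

-- B-side loop invariant: on a sorted suffix b, with prev = c seen k times just before b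
theorem pvGoB_spec (t : Int) (_ht : 1 ≤ t) :
    ∀ (b : List Int) (c : Option Int) (k : Int),
      b.Pairwise (· ≤ ·) →
      (∀ y ∈ b, ∀ cv, c = some cv → cv ≤ y) →
      k < t →
      pvGoB t b c k =
        ((b.filter (fun v => decide (t ≤ (b.count v : Int) + (if some v = c then k else 0)))).head?).getD (-1) := by
  intro b
  induction b with
  | nil => intro c k _ _ _; simp [pvGoB]
  | cons x xs ih =>
    intro c k hp hge hk
    have hp' : xs.Pairwise (· ≤ ·) := (List.pairwise_cons.mp hp).2
    have hx_le : ∀ y ∈ xs, x ≤ y := (List.pairwise_cons.mp hp).1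
    set k' : Int := if some x = c then k + 1 else 1 with hk'
    set q : Int → Bool :=
      fun v => decide (t ≤ (((x :: xs).count v : Int)) + (if some v = c then k else 0)) with hq
    set q' : Int → Bool :=
      fun v => decide (t ≤ ((xs.count v : Int)) + (if some v = some x then k' else 0)) with hq'
    have hcongr : ∀ v ∈ xs, q v = q' v := by
      intro v hv
      by_cases hvx : v = x
      · subst hvx
        simp only [hq, hq', List.count_cons_self]
        by_cases hvc : some v = c
        · simp only [if_pos hvc, hk', decide_eq_decide]
          push_cast; omega
        · simp only [if_neg hvc, hk', decide_eq_decide]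
          push_cast; omega
      · have hvc : some v ≠ c := by
          intro h
          rcases c with _ | cv
          · exact Option.some_ne_none v h
          · obtain rfl : v = cv := by injection h
            exact hvx (le_antisymm (hge x (List.mem_cons_self ..) v rfl) (hx_le v hv))
        have hvx' : some v ≠ some x := by simpa using hvx
        simp [hq, hq', List.count_cons, hvx, hvc, show x ≠ v from fun h => hvx h.symm]
    show (if t ≤ k' then x else pvGoB t xs (some x) k') = ((List.filter q (x :: xs)).head?).getD (-1)
    by_cases h1 : t ≤ k'
    · -- early return: x qualifies, and it heads the filtered list
      have hqx : q x = true := by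
        simp only [hq, List.count_cons_self, decide_eq_true_eq]
        by_cases hvc : some x = c
        · rw [if_pos hvc]
          have : k' = k + 1 := by rw [hk', if_pos hvc]
          push_cast; omega
        · rw [if_neg hvc]
          have : k' = 1 := by rw [hk', if_neg hvc]
          push_cast; omega
      rw [if_pos h1, List.filter_cons_of_pos hqx]
      simp
    · -- recurse
      have hk'' : k' < t := lt_of_not_ge h1
      rw [if_neg h1,
        ih (some x) k' hp' (by intro y hy cv hcv; cases hcv; exact hx_le y hy) hk'']
      have hfilter_eq : List.filter q' xs = List.filter q xs :=
        (List.filter_congr (fun v hv => (hcongr v hv).symm))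
      rw [show (fun v => decide (t ≤ ((xs.count v : Int)) + (if some v = some x then k' else 0))) = q' from rfl,
        hfilter_eq]
      by_cases hqx : q x = true
      · -- x qualifies overall but its run is not yet long enough: x still in xs
        have hxxs : x ∈ xs := by
          have := of_decide_eq_true (by simpa [hq, List.count_cons_self] using hqx)
          have hcnt : 1 ≤ (xs.count x : Int) := by
            by_cases hvc : some x = c
            · have hk2 : k' = k + 1 := by rw [hk', if_pos hvc]
              rw [if_pos hvc] at this; omega
            · have hk2 : k' = 1 := by rw [hk', if_neg hvc]
              rw [if_neg hvc] at this; omega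
          have : 0 < xs.count x := by exact_mod_cast lt_of_lt_of_le zero_lt_one hcnt
          exact List.count_pos_iff.mp this
        have hqx' : q' x = true := (hcongr x hxxs).symm ▸ hqx
        have hxmem : x ∈ List.filter q xs := List.mem_filter.mpr ⟨hxxs, (hcongr x hxxs) ▸ hqx'⟩
        rw [List.filter_cons_of_pos hqx]
        -- head of (filter q xs) equals x
        rcases hfe : List.filter q xs with _ | ⟨h, l'⟩
        · rw [hfe] at hxmem; simp at hxmem
        · have hpf : (List.filter q xs).Pairwise (· ≤ ·) :=
            hp'.sublist List.filter_sublist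
          rw [hfe] at hpf hxmem
          have h1' : h ≤ x := pv_head_le_mem hpf hxmem
          have h2' : x ≤ h := hx_le h (by
            have : h ∈ List.filter q xs := by rw [hfe]; exact List.mem_cons_self ..
            exact (List.mem_filter.mp this).1)
          have : h = x := le_antisymm h1' h2'
          simp [this]
      · rw [List.filter_cons_of_neg (by simpa using hqx)]

-- A-side: the dict loop is Counter, and min over its qualifying keys is pvSpecMin
theorem pvA_eq_specMin (t : Int) (a : List Int) :
    (let m : PySem.Dict Int Int := a.foldl (fun d n => d.insert n (d.getD n 0 + 1)) PySem.Dict.empty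
     let s : List Int := m.keys.filter (fun k => decide (t ≤ m.getD k 0))
     if 0 < s.length then (PySem.List.min? s (fun x => x)).getD (-1) else -1) =
    pvSpecMin t (PySem.List.sorted a (fun x => x) false) := by
  simp only
  rw [PySem.Dict.foldl_insert_getD_add_one_eq_counter]
  set sb := PySem.List.sorted a (fun x => x) false with hsb
  have hcnt : ∀ v : Int, sb.count v = a.count v :=
    fun v => (PySem.List.sorted_perm a (fun x => x) false).count_eq v
  set s : List Int :=
    (PySem.Dict.counter a).keys.filter (fun k => decide (t ≤ (PySem.Dict.counter a).getD k 0)) with hs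
  have hmem_s : ∀ v : Int, v ∈ s ↔ v ∈ a ∧ t ≤ (a.count v : Int) := by
    intro v
    rw [hs, List.mem_filter, PySem.Dict.keys_counter]
    constructor
    · rintro ⟨h1, h2⟩
      exact ⟨(PySem.Set.mem_ofList ..).mp h1,
        by have := of_decide_eq_true h2; rwa [PySem.Dict.getD_counter] at this⟩
    · rintro ⟨h1, h2⟩
      exact ⟨(PySem.Set.mem_ofList ..).mpr h1,
        decide_eq_true (by rwa [PySem.Dict.getD_counter])⟩
  set f : List Int := sb.filter (fun v => decide (t ≤ (sb.count v : Int))) with hf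
  have hmem_f : ∀ v : Int, v ∈ f ↔ v ∈ a ∧ t ≤ (a.count v : Int) := by
    intro v
    rw [hf, List.mem_filter, PySem.List.mem_sorted]
    constructor
    · rintro ⟨h1, h2⟩
      exact ⟨h1, by have := of_decide_eq_true h2; rwa [hcnt] at this⟩
    · rintro ⟨h1, h2⟩
      exact ⟨h1, decide_eq_true (by rwa [hcnt])⟩
  show (if 0 < s.length then (PySem.List.min? s (fun x => x)).getD (-1) else -1) = f.head?.getD (-1)
  by_cases hse : s = []
  · have hfe : f = [] := by
      rw [List.eq_nil_iff_forall_not_mem]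
      intro v hv
      have := (hmem_s v).mpr ((hmem_f v).mp hv)
      rw [hse] at this; simp at this
    rw [hse, hfe]; simp
  · have hlen : 0 < s.length := List.length_pos_iff.mpr hse
    rw [if_pos hlen]
    rcases hmin : PySem.List.min? s (fun x => x) with _ | m
    · exact absurd ((PySem.List.min?_eq_none_iff ..).mp hmin) hse
    · have hm_mem : m ∈ s := PySem.List.min?_mem hmin
      have hm_min : ∀ y ∈ s, m ≤ y := fun y hy => PySem.List.min?_isMin hmin y hy
      have hm_f : m ∈ f := (hmem_f m).mpr ((hmem_s m).mp hm_mem)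
      rcases hfe : f with _ | ⟨h, l'⟩
      · rw [hfe] at hm_f; simp at hm_f
      · have hpf : f.Pairwise (· ≤ ·) := by
          rw [hf]
          exact (PySem.List.sorted_pairwise a (fun x => x)).sublist List.filter_sublist
        rw [hfe] at hpf hm_f
        have hh_s : h ∈ s := (hmem_s h).mpr ((hmem_f h).mp (by rw [hfe]; exact List.mem_cons_self ..))
        have h1 : h ≤ m := pv_head_le_mem hpf hm_f
        have h2 : m ≤ h := hm_min h hh_s
        simp [le_antisymm h1 h2]

-- threshold t computed by both ports is ≥ 1 on a nonempty list
theorem pv_threshold_pos (a : List Int) (ha : a ≠ []) :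
    1 ≤ (if PySem.Int.floordiv ((PySem.Int.floordiv ((a.length : Int) * 33) 100) * 100) 33 ≠ (a.length : Int)
         then PySem.Int.floordiv ((a.length : Int) * 33) 100 + 1
         else PySem.Int.floordiv ((a.length : Int) * 33) 100) := by
  have hlen : 1 ≤ (a.length : Int) := by
    have := List.length_pos_iff.mpr ha; exact_mod_cast this
  have ht0 : 0 ≤ PySem.Int.floordiv ((a.length : Int) * 33) 100 := by
    rw [PySem.Int.floordiv_eq_ediv_of_pos (by norm_num)]
    exact Int.ediv_nonneg (by positivity) (by norm_num)
  split_ifs with h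
  · omega
  · by_contra hc
    have ht00 : PySem.Int.floordiv ((a.length : Int) * 33) 100 = 0 := by omega
    rw [ht00] at h
    simp [PySem.Int.floordiv] at h
    omega

-- ===== VERDICT (by name: the statement is the Claim_ definition above) =====
theorem thirtythreepercentappearance_spec : Claim_equal_thirtythreepercentappearance := by
  intro a _
  show thirtythreepercentappearance a = thirtythreepercentappearance_alt a
  by_cases ha : a = []
  · subst ha; decide
  · unfold thirtythreepercentappearance thirtythreepercentappearance_alt
    simp only
    set t : Int := if PySem.Int.floordiv ((PySem.Int.floordiv ((a.length : Int) * 33) 100) * 100) 33 ≠ (a.length : Int)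
         then PySem.Int.floordiv ((a.length : Int) * 33) 100 + 1
         else PySem.Int.floordiv ((a.length : Int) * 33) 100 with htdef
    have ht : 1 ≤ t := pv_threshold_pos a ha
    rw [pvA_eq_specMin t a,
      pvGoB_spec t ht (PySem.List.sorted a (fun x => x) false) none 0
        (PySem.List.sorted_pairwise a (fun x => x))
        (by intro y _ cv hcv; exact nomatch hcv)
        (by omega)]
    unfold pvSpecMin
    simp
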